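-- pv_equiv track=rewrite | github.com/iamvbenz49/DSA-QUESTIONS | medium/maximum_area_of_piece_of_cake_after_horizontal_and_vertical_cuts.py | area_calc
-- ===== SOURCE A (Python) =====
-- def area_calc(cuts,length):
--     sums = 0
--     for i in range(0,len(cuts)+1):
--         if i == 0:
--             sums = cuts[i]
--         elif 0<i<len(cuts):
--             if cuts[i]-cuts[i-1]>sums:
--                 sums = cuts[i]-cuts[i-1]
--             else:
--                 continue
--         else:
--             if length-cuts[i-1]>sums:
--                 sums = length-cuts[i-1]
--                 return sums
--             else:
--                 return sums
-- ===== SOURCE B (Python) =====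
-- def area_calc(cuts, length):
--     # Divide and conquer over the gap indices 0..len(cuts):
--     # gap(0)=cuts[0], gap(i)=cuts[i]-cuts[i-1], gap(n)=length-cuts[-1];
--     # the answer is the max over an index interval, computed by splitting
--     # the interval in half and combining with max (depth O(log n)).
--     n = len(cuts)
--
--     def gap(i):
--         if i == 0:
--             return cuts[0]
--         if i == n:
--             return length - cuts[-1]
--         return cuts[i] - cuts[i - 1]
--
--     def solve(lo, hi):
--         if lo == hi:
--             return gap(lo)
--         mid = (lo + hi) // 2
--         return max(solve(lo, mid), solve(mid + 1, hi))
--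
--     return solve(0, n)
-- ===== Notes on version B (the rewrite author's own statement) =====
-- stated objective: alternative
-- what changed: Replaces A's single linear scan with a running max and early return by a divide-and-conquer: the gaps are indexed 0..n and the maximum over an index interval is computed by halving the interval and combining the two halves with max.
import Mathlib
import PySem

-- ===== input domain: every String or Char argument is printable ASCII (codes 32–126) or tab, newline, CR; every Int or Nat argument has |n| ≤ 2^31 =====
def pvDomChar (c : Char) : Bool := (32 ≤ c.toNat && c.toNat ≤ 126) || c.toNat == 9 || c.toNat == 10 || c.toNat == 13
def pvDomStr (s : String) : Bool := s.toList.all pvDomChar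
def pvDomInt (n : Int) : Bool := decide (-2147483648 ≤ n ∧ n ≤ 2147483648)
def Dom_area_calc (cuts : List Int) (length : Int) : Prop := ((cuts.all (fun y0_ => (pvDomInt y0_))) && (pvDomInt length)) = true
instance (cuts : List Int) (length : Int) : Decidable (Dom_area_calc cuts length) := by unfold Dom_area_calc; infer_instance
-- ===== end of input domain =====

-- B computes the same max-gap by divide and conquer over the gap indices 0..n
-- (split the interval in half, combine with max) instead of A's linear scan
-- with a running max and early return. Same O(n) cost, different algorithm.

-- ===== PORT A =====
-- the for-loop over range(0, len(cuts)+1) with its early return, as structural recursion on i;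
-- indices are in range on every reachable access for cuts ≠ [], so pyGetD is exact there
def areaA_go (cuts : List Int) (length : Int) (i : Nat) (s : Int) : Int :=
  if _h : i < cuts.length + 1 then
    if i = 0 then
      areaA_go cuts length (i + 1) (PySem.List.pyGetD cuts (i : Int) 0)
    else if i < cuts.length then
      areaA_go cuts length (i + 1)
        (if PySem.List.pyGetD cuts (i : Int) 0 - PySem.List.pyGetD cuts ((i : Int) - 1) 0 > s then
          PySem.List.pyGetD cuts (i : Int) 0 - PySem.List.pyGetD cuts ((i : Int) - 1) 0
         else s)
    else
      if length - PySem.List.pyGetD cuts ((i : Int) - 1) 0 > s then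
        length - PySem.List.pyGetD cuts ((i : Int) - 1) 0
      else s
  else s  -- loop exhausted without return (Python: None); reachable only for cuts = [], outside Pre_
termination_by cuts.length + 1 - i

def area_calc (cuts : List Int) (length : Int) : Int :=
  areaA_go cuts length 0 0

-- ===== PORT B =====
-- gap(i): the i-th gap, i ∈ 0..len(cuts) (Python's nested 'gap'; cuts[0] raises on empty cuts, outside Pre_)
def gapB (cuts : List Int) (length : Int) (i : Nat) : Int :=
  if i = 0 then PySem.List.pyGetD cuts 0 0
  else if i = cuts.length then length - PySem.List.pyGetD cuts (-1) 0
  else PySem.List.pyGetD cuts (i : Int) 0 - PySem.List.pyGetD cuts ((i : Int) - 1) 0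

-- Python's nested 'solve(lo, hi)'; the guard is 'hi ≤ lo' instead of 'lo == hi' only to make the
-- recursion total — solve is never called with lo > hi. '(lo+hi)/2' on Nat equals Python's
-- '(lo+hi)//2' exactly since lo, hi ≥ 0.
def solveB (cuts : List Int) (length : Int) (lo hi : Nat) : Int :=
  if _h : hi ≤ lo then gapB cuts length lo
  else
    max (solveB cuts length lo ((lo + hi) / 2))
        (solveB cuts length ((lo + hi) / 2 + 1) hi)
termination_by hi - lo
decreasing_by all_goals omega

def area_calc_alt (cuts : List Int) (length : Int) : Int :=
  solveB cuts length 0 cuts.length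

-- ===== PRECONDITION & SPEC =====
-- both Pythons raise IndexError on empty cuts (cuts[0])
def Pre_area_calc (cuts : List Int) (_length : Int) : Prop := cuts ≠ []
instance (cuts : List Int) (length : Int) : Decidable (Pre_area_calc cuts length) := by
  unfold Pre_area_calc; infer_instance
def pvWitness_area_calc : List Int × Int := ([2, 5, 1], 9)

def Spec_area_calc (cuts : List Int) (length : Int) (out : Int) : Prop := out = area_calc_alt cuts length
instance (cuts : List Int) (length : Int) (out : Int) : Decidable (Spec_area_calc cuts length out) := by unfold Spec_area_calc; infer_instance

-- ===== CLAIM (what is proved, stated in full; the proofs are below) =====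
def Claim_equal_area_calc : Prop := ∀ (cuts : List Int) (length : Int), Dom_area_calc cuts length → Pre_area_calc cuts length → Spec_area_calc cuts length (area_calc cuts length)

-- ===== LEMMAS AND PROOFS =====

-- reference value: max of gap lo, gap (lo+1), …, gap (lo+k)
def Imax (gap : Nat → Int) (lo k : Nat) : Int :=
  match k with
  | 0 => gap lo
  | k + 1 => max (Imax gap lo k) (gap (lo + k + 1))

theorem Imax_split (gap : Nat → Int) (lo a b : Nat) :
    Imax gap lo (a + b + 1) = max (Imax gap lo a) (Imax gap (lo + a + 1) b) := by
  induction b with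
  | zero => rfl
  | succ b ih =>
    have : a + (b + 1) + 1 = (a + b + 1) + 1 := by omega
    rw [this, Imax, ih, Imax, max_assoc]
    have e : lo + (a + b + 1) + 1 = lo + a + 1 + b + 1 := by omega
    rw [e]

theorem Imax_cons (gap : Nat → Int) (lo k : Nat) :
    Imax gap lo (k + 1) = max (gap lo) (Imax gap (lo + 1) k) := by
  have h := Imax_split gap lo 0 k
  simpa [Imax] using h

theorem solveB_eq_Imax (cuts : List Int) (length : Int) :
    ∀ (d lo hi : Nat), hi - lo = d → lo ≤ hi →
    solveB cuts length lo hi = Imax (gapB cuts length) lo (hi - lo) := by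
  intro d
  induction d using Nat.strong_induction_on with
  | _ d ih =>
    intro lo hi hd hle
    rw [solveB]
    by_cases h : hi ≤ lo
    · have : hi - lo = 0 := by omega
      rw [dif_pos h, this, Imax]
    · rw [dif_neg h]
      have hlo : lo < hi := by omega
      have hm1 : lo ≤ (lo + hi) / 2 := by omega
      have hm2 : (lo + hi) / 2 < hi := by omega
      rw [ih ((lo + hi) / 2 - lo) (by omega) lo _ rfl hm1,
          ih (hi - ((lo + hi) / 2 + 1)) (by omega) _ hi rfl (by omega)]
      have hsplit := Imax_split (gapB cuts length) lo ((lo + hi) / 2 - lo) (hi - ((lo + hi) / 2 + 1))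
      have e1 : ((lo + hi) / 2 - lo) + (hi - ((lo + hi) / 2 + 1)) + 1 = hi - lo := by omega
      have e2 : lo + ((lo + hi) / 2 - lo) + 1 = (lo + hi) / 2 + 1 := by omega
      rw [e1, e2] at hsplit
      rw [hsplit]

theorem if_gt_eq_max (s x : Int) : (if x > s then x else s) = max s x := by
  split_ifs with h <;> omega

-- last element: cuts[len-1] = cuts[-1] for nonempty cuts
theorem pyGetD_len_sub_one (cuts : List Int) (h : cuts ≠ []) :
    PySem.List.pyGetD cuts ((cuts.length : Int) - 1) 0 = PySem.List.pyGetD cuts (-1) 0 := by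
  have hlen : 0 < cuts.length := List.length_pos_iff.mpr h
  rw [PySem.List.pyGetD_neg_one cuts 0 h, PySem.List.pyGetD_eq_getElem cuts _ (by omega) (by omega)]
  have : ((cuts.length : Int) - 1).toNat = cuts.length - 1 := by omega
  simp_rw [this]
  rw [List.getLast_eq_getElem]

-- A's loop from position i (1 ≤ i ≤ n) computes max s (max of gaps i..n)
theorem areaA_go_eq (cuts : List Int) (length : Int) (hne : cuts ≠ []) :
    ∀ (k i : Nat) (s : Int), i + k = cuts.length → 1 ≤ i →
    areaA_go cuts length i s = max s (Imax (gapB cuts length) i (cuts.length - i)) := by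
  intro k
  induction k with
  | zero =>
    intro i s hik hi
    have hi' : i = cuts.length := by omega
    subst hi'
    rw [areaA_go, dif_pos (by omega), if_neg (by omega), if_neg (by omega)]
    have : cuts.length - cuts.length = 0 := by omega
    rw [this, Imax, if_gt_eq_max, pyGetD_len_sub_one cuts hne, gapB,
        if_neg (by omega), if_pos rfl]
  | succ k ih =>
    intro i s hik hi
    rw [areaA_go, dif_pos (by omega), if_neg (by omega), if_pos (by omega)]
    rw [ih (i + 1) _ (by omega) (by omega), if_gt_eq_max]
    have h1 : cuts.length - i = (cuts.length - (i + 1)) + 1 := by omega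
    rw [h1, Imax_cons, ← max_assoc]
    congr 2
    rw [gapB, if_neg (by omega), if_neg (by omega)]

-- ===== VERDICT (by name: the statement is the Claim_ definition above) =====
theorem area_calc_spec : Claim_equal_area_calc := by
  intro cuts length _hD hPre
  unfold Spec_area_calc area_calc area_calc_alt
  have hlen : 0 < cuts.length := List.length_pos_iff.mpr hPre
  rw [areaA_go, dif_pos (by omega), if_pos rfl]
  rw [areaA_go_eq cuts length hPre (cuts.length - 1) 1 _ (by omega) (by omega)]
  rw [solveB_eq_Imax cuts length cuts.length 0 cuts.length rfl (by omega)]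
  have h1 : cuts.length - 0 = (cuts.length - 1) + 1 := by omega
  rw [h1, Imax_cons]
  simp [gapB]
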